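-- pv_equiv track=rewrite | github.com/darshjme/djcode | src/djcode/tools/notebook.py | _string_to_source_lines
-- ===== SOURCE A (Python) =====
-- def _string_to_source_lines(text: str) -> list[str]:
--     """Convert a string to notebook source format (list of lines with newlines)."""
--     lines = text.split("\n")
--     result: list[str] = []
--     for i, line in enumerate(lines):
--         if i < len(lines) - 1:
--             result.append(line + "\n")
--         else:
--             # Last line: only add if non-empty
--             if line:
--                 result.append(line)
--     return result
-- ===== SOURCE B (Python) =====
-- def _string_to_source_lines(text: str) -> list[str]:
--     """Single left-to-right character scan: accumulate a buffer, emit a line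
--     (including its newline) whenever '\n' is seen, flush a non-empty tail."""
--     result = []
--     buf = []
--     for ch in text:
--         buf.append(ch)
--         if ch == "\n":
--             result.append("".join(buf))
--             buf = []
--     if buf:
--         result.append("".join(buf))
--     return result
-- ===== Notes on version B (the rewrite author's own statement) =====
-- stated objective: alternative
-- what changed: Replaces split-on-newline followed by an enumerate loop with a last-index special case by a single character scan that accumulates a buffer and emits each line (newline included) as it completes, flushing a non-empty tail at the end.
import Mathlib
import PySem

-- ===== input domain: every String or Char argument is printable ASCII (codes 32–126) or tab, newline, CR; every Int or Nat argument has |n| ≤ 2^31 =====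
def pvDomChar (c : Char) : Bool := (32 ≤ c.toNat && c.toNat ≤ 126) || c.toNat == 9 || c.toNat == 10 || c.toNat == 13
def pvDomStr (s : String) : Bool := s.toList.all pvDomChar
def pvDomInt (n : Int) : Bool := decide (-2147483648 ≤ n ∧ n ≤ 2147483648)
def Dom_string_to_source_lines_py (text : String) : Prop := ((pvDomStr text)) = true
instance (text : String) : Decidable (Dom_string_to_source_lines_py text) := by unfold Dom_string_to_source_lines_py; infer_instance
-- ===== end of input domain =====

-- B replaces split('\n')+enumerate loop by a single buffered character scan; objective: alternative (same cost).

-- ===== PORT A =====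
def string_to_source_lines_py (text : String) : List String :=
  -- lines = text.split("\n")
  let lines : List String := (PySem.Chars.splitOn text.toList ['\n']).map String.ofList
  -- for i, line in enumerate(lines): …
  let result : List String :=
    (PySem.List.enumerate lines).foldl
      (fun result p =>
        if p.1 < (lines.length : Int) - 1 then result ++ [p.2 ++ "\n"]
        else if p.2 ≠ "" then result ++ [p.2] else result)
      []
  result

-- ===== PORT B =====
def string_to_source_lines_py_alt (text : String) : List String :=
  let st := text.toList.foldl
      (fun (st : List String × List Char) ch =>
        let buf := st.2 ++ [ch]
        if ch = '\n' then (st.1 ++ [String.ofList buf], []) else (st.1, buf))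
      ([], [])
  if st.2 ≠ [] then st.1 ++ [String.ofList st.2] else st.1

-- ===== PRECONDITION & SPEC =====
def Spec_string_to_source_lines_py (text : String) (out : List String) : Prop := out = string_to_source_lines_py_alt text
instance (text : String) (out : List String) : Decidable (Spec_string_to_source_lines_py text out) := by unfold Spec_string_to_source_lines_py; infer_instance

-- ===== CLAIM (what is proved, stated in full; the proofs are below) =====
def Claim_equal_string_to_source_lines_py : Prop := ∀ (text : String), Dom_string_to_source_lines_py text → Spec_string_to_source_lines_py text (string_to_source_lines_py text)

-- ===== LEMMAS AND PROOFS =====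

-- structural split of a char list at '\n' (always returns a nonempty list of segments)
def pvS : List Char → List (List Char)
  | [] => [[]]
  | c :: rest => if c = '\n' then [] :: pvS rest else (c :: (pvS rest).headI) :: (pvS rest).tail

-- the common reference value: the list of source lines, built structurally
def pvG : List Char → List String
  | [] => []
  | c :: rest =>
    if c = '\n' then "\n" :: pvG rest
    else match pvG rest with
      | [] => [String.ofList [c]]
      | h :: t => String.ofList (c :: h.toList) :: t

theorem pvS_ne_nil (cs : List Char) : pvS cs ≠ [] := by
  cases cs with
  | nil => simp [pvS]
  | cons c rest => by_cases h : c = '\n' <;> simp [pvS, h]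

-- go with single-char separator computes pvS (with current segment prefix and accumulator)
theorem pv_splitOn_go (l : List Char) : ∀ (fuel : Nat) (cur : List Char) (acc : List (List Char)),
    l.length < fuel →
    PySem.Chars.splitOn.go ['\n'] fuel l cur acc
      = acc.reverse ++ ((cur.reverse ++ (pvS l).headI) :: (pvS l).tail) := by
  induction l with
  | nil =>
    intro fuel cur acc h
    cases fuel with
    | zero => omega
    | succ f => simp [PySem.Chars.splitOn.go, pvS]
  | cons c rest ih =>
    intro fuel cur acc h
    cases fuel with
    | zero => omega
    | succ f =>
      by_cases hc : c = '\n'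
      · subst hc
        have hpre : ['\n'].isPrefixOf ('\n' :: rest) = true := by
          simp [List.isPrefixOf]
        simp only [PySem.Chars.splitOn.go, hpre, if_pos]
        rw [show List.drop (['\n'] : List Char).length ('\n' :: rest) = rest by simp]
        rw [ih f [] (cur.reverse :: acc) (by simp at h; omega)]
        cases hS : pvS rest with
        | nil => exact absurd hS (pvS_ne_nil rest)
        | cons sh st => simp [pvS, hS]
      · have hpre : ['\n'].isPrefixOf (c :: rest) = false := by
          simp [List.isPrefixOf]
          exact fun hh => absurd hh.symm hc
        simp only [PySem.Chars.splitOn.go, hpre]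
        rw [if_neg (by simp)]
        rw [ih f (c :: cur) acc (by simp at h; omega)]
        simp [pvS, hc]

theorem pv_splitOn_eq (cs : List Char) : PySem.Chars.splitOn cs ['\n'] = pvS cs := by
  unfold PySem.Chars.splitOn
  rw [pv_splitOn_go cs (cs.length + 1) [] [] (by omega)]
  cases hS : pvS cs with
  | nil => exact absurd hS (pvS_ne_nil cs)
  | cons sh st => simp

-- the enumerate fold of port A, characterised over a tail of the line list
theorem pv_enum_fold (N : Int) : ∀ (ls : List String) (k : Int) (acc : List String),
    ls ≠ [] → k + ls.length = N →
    (PySem.List.enumerate ls k).foldl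
      (fun result p =>
        if p.1 < N - 1 then result ++ [p.2 ++ "\n"]
        else if p.2 ≠ "" then result ++ [p.2] else result) acc
    = acc ++ (ls.dropLast.map (· ++ "\n"))
        ++ (if ls.getLast! ≠ "" then [ls.getLast!] else []) := by
  intro ls
  induction ls with
  | nil => intro k acc h _; exact absurd rfl h
  | cons x rest ih =>
    intro k acc _ hN
    cases rest with
    | nil =>
      have hk : ¬ (k < N - 1) := by simp at hN; omega
      simp [PySem.List.enumerate, hk, List.getLast!]
      split <;> simp
    | cons y t =>
      have hk : k < N - 1 := by simp at hN; omega
      rw [show PySem.List.enumerate (x :: y :: t) k = (k, x) :: PySem.List.enumerate (y :: t) (k + 1) from rfl,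
          List.foldl_cons]
      simp only [if_pos hk]
      rw [ih (k + 1) (acc ++ [x ++ "\n"]) (by simp) (by simp at hN ⊢; omega)]
      simp [List.getLast!]

-- prefix a pending buffer onto the first produced line
def pvPre (buf : List Char) : List String → List String
  | [] => if buf ≠ [] then [String.ofList buf] else []
  | h :: t => String.ofList (buf ++ h.toList) :: t

theorem pvPre_nil (l : List String) : pvPre [] l = l := by
  cases l <;> simp [pvPre]

theorem pv_getLast!_cc (x y : String) (t : List String) :
    (x :: y :: t).getLast! = (y :: t).getLast! := by
  simp [List.getLast!]

-- the A-side value equals pvG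
set_option maxRecDepth 4000 in
theorem pv_AS_eq_G (cs : List Char) :
    (((pvS cs).map String.ofList).dropLast.map (· ++ "\n"))
      ++ (if ((pvS cs).map String.ofList).getLast! ≠ "" then [((pvS cs).map String.ofList).getLast!] else [])
    = pvG cs := by
  induction cs with
  | nil => simp [pvS, pvG, List.getLast!]
  | cons c rest ih =>
    by_cases hc : c = '\n'
    · subst hc
      cases hS : pvS rest with
      | nil => exact absurd hS (pvS_ne_nil rest)
      | cons sh st =>
        rw [hS] at ih
        rw [show pvS ('\n' :: rest) = [] :: sh :: st from by simp [pvS, hS],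
            show pvG ('\n' :: rest) = "\n" :: pvG rest from by simp [pvG], ← ih]
        simp [List.getLast!]
    · cases hS : pvS rest with
      | nil => exact absurd hS (pvS_ne_nil rest)
      | cons sh st =>
        rw [hS] at ih
        cases st with
        | nil =>
          rw [show pvS (c :: rest) = [c :: sh] from by simp [pvS, hc, hS]]
          simp only [List.map_cons, List.map_nil,
            show ∀ a : String, [a].dropLast = [] from fun _ => rfl, List.getLast!] at ih ⊢
          by_cases hsh : sh = []
          · subst hsh
            simp at ih
            simp only [pvG]
            rw [if_neg hc, ih]
            simp
          · simp [← String.toList_inj, hsh] at ih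
            simp only [pvG]
            rw [if_neg hc, ← ih]
            simp [← String.toList_inj]
        | cons s2 st2 =>
          rw [show pvS (c :: rest) = (c :: sh) :: s2 :: st2 from by simp [pvS, hc, hS]]
          simp only [List.map_cons,
            show ∀ (a b : String) (l : List String), (a :: b :: l).dropLast = a :: (b :: l).dropLast
              from fun _ _ _ => rfl, pv_getLast!_cc, List.cons_append] at ih ⊢
          simp only [pvG]
          rw [if_neg hc, ← ih]
          show _ = String.ofList (c :: (String.ofList sh ++ "\n").toList) :: _
          rw [List.cons.injEq]
          exact ⟨by simp [← String.toList_inj], rfl⟩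

-- named loop body and finaliser of port B (definitionally those of the port)
def pvStep (st : List String × List Char) (ch : Char) : List String × List Char :=
  let buf := st.2 ++ [ch]
  if ch = '\n' then (st.1 ++ [String.ofList buf], []) else (st.1, buf)

def pvFin (st : List String × List Char) : List String :=
  if st.2 ≠ [] then st.1 ++ [String.ofList st.2] else st.1

-- the B-side fold invariant
theorem pv_B_inv (cs : List Char) : ∀ (res : List String) (buf : List Char),
    pvFin (cs.foldl pvStep (res, buf)) = res ++ pvPre buf (pvG cs) := by
  induction cs with
  | nil =>
    intro res buf
    cases buf <;> simp [pvG, pvPre, pvFin]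
  | cons c rest ih =>
    intro res buf
    rw [List.foldl_cons]
    by_cases hc : c = '\n'
    · subst hc
      rw [show pvStep (res, buf) '\n' = (res ++ [String.ofList (buf ++ ['\n'])], []) from by
            simp [pvStep]]
      rw [ih (res ++ [String.ofList (buf ++ ['\n'])]) []]
      simp [pvG, pvPre]
      cases pvG rest <;> simp
    · rw [show pvStep (res, buf) c = (res, buf ++ [c]) from by simp [pvStep, hc]]
      rw [ih res (buf ++ [c])]
      cases hG : pvG rest with
      | nil => simp [pvG, pvPre, hc, hG]
      | cons h t => simp [pvG, pvPre, hc, hG]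

theorem pv_A_eq_G (text : String) : string_to_source_lines_py text = pvG text.toList := by
  unfold string_to_source_lines_py
  simp only []
  rw [pv_splitOn_eq]
  rw [pv_enum_fold (((pvS text.toList).map String.ofList).length : Int)
        ((pvS text.toList).map String.ofList) 0 []
        (by simp [pvS_ne_nil]) (by simp)]
  simpa using pv_AS_eq_G text.toList

theorem pv_B_eq_G (text : String) : string_to_source_lines_py_alt text = pvG text.toList := by
  show pvFin (text.toList.foldl pvStep ([], [])) = pvG text.toList
  rw [pv_B_inv]
  simp [pvPre_nil]

-- ===== VERDICT (by name: the statement is the Claim_ definition above) =====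
theorem string_to_source_lines_py_spec : Claim_equal_string_to_source_lines_py := by
  intro text _
  unfold Spec_string_to_source_lines_py
  rw [pv_A_eq_G, pv_B_eq_G]
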